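-- pv_equiv track=rewrite | github.com/gorzerk1/Printer-ETL-Hub | convertToJson.py | _choose_indices_for_sheet
-- ===== SOURCE A (Python) =====
-- SHEET_SPECS = {
--     "Company_Grouped": {
--         "keys": ["ID", "Floor", "Printer IP", "Type", "Serial", "Comment"],
--         "cols": 6,
--     },
--     "Branches_Grouped": {
--         "keys": ["ID", "Name", "Printer IP", "BO IP", "Type", "Serial", "Comment"],
--         "cols": 7,
--     },
-- }
--
-- def _norm(s):
--     if s is None:
--         return ""
--     return " ".join(str(s).strip().lower().split())
--
-- def _choose_indices_for_sheet(sheet_name, header_map):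
--     spec = SHEET_SPECS[sheet_name]
--     keys = spec["keys"]
--     limit = spec["cols"]
--     idx_for_key = [-1] * len(keys)
--     taken = set()
--     for k_i, key in enumerate(keys):
--         target = _norm(key)
--         found = -1
--         for col_i in range(limit):
--             if col_i in header_map and header_map[col_i] == target and col_i not in taken:
--                 found = col_i
--                 break
--         idx_for_key[k_i] = found
--         if found >= 0:
--             taken.add(found)
--     return idx_for_key
-- ===== SOURCE B (Python) =====
-- SHEET_SPECS = {
--     "Company_Grouped": {
--         "keys": ["ID", "Floor", "Printer IP", "Type", "Serial", "Comment"],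
--         "cols": 6,
--     },
--     "Branches_Grouped": {
--         "keys": ["ID", "Name", "Printer IP", "BO IP", "Type", "Serial", "Comment"],
--         "cols": 7,
--     },
-- }
--
-- def _norm(s):
--     if s is None:
--         return ""
--     return " ".join(str(s).strip().lower().split())
--
-- def _choose_indices_for_sheet(sheet_name, header_map):
--     spec = SHEET_SPECS[sheet_name]
--     # one pass over the columns: header value -> its column indices, ascending
--     index = {}
--     for col_i in range(spec["cols"]):
--         if col_i in header_map:
--             index.setdefault(header_map[col_i], []).append(col_i)
--     # one pass over the keys: pop the smallest still-available matching column
--     out = []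
--     for key in spec["keys"]:
--         cols = index.get(_norm(key), [])
--         out.append(cols.pop(0) if cols else -1)
--     return out
-- ===== Notes on version B (the rewrite author's own statement) =====
-- stated objective: idiomatic
-- what changed: Replaces the per-key scan over all columns (with a 'taken' set) by a single pass that builds a dict from header value to its ascending column indices, then one pass over the keys popping the front of the matching list (or -1), so the inner column loop disappears; Pre_ only excludes sheet names outside SHEET_SPECS, where both A and B raise KeyError.
import Mathlib
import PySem

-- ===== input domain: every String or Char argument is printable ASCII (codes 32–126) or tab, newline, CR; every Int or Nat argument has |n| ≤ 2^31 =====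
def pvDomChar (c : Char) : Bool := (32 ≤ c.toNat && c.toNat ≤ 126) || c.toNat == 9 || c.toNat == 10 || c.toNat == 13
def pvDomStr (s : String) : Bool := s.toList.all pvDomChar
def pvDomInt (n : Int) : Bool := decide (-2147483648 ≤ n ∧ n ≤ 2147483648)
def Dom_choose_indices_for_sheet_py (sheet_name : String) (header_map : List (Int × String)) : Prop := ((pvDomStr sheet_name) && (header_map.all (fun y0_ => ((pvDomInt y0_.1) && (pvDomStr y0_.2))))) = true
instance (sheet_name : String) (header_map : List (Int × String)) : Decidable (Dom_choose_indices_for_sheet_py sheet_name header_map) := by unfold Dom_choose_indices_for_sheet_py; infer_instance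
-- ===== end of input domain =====

-- B replaces A's per-key column scan by a value→columns index built in one pass plus front-pops (idiomatic; Pre_ excludes sheet names outside SHEET_SPECS, where A raises KeyError).


-- ===== PORT A =====
-- module constant SHEET_SPECS (spec dict: keys list and column count per sheet)
def pySheetSpecs : PySem.Dict String (List String × Int) :=
  PySem.Dict.ofList
    [("Company_Grouped", (["ID", "Floor", "Printer IP", "Type", "Serial", "Comment"], 6)),
     ("Branches_Grouped", (["ID", "Name", "Printer IP", "BO IP", "Type", "Serial", "Comment"], 7))]

-- module helper _norm (argument is always a str key here, never None)
def pyNorm (s : String) : String :=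
  PySem.Str.join " " (PySem.Str.split₀ (PySem.Str.lower (PySem.Str.strip s)))

-- A's inner 'for col_i in range(limit): … break' loop: first matching column, else -1
def chooseAInner (hm : PySem.Dict Int String) (target : String) (taken : PySem.Set Int) : List Int → Int
  | [] => -1
  | c :: cs =>
    if hm.contains c && (hm.get? c == some target) && !(PySem.Set.contains taken c) then c
    else chooseAInner hm target taken cs

-- A's outer loop over keys; idx_for_key is filled at positions 0,1,… in order, so it is built front-to-back
def chooseALoop (hm : PySem.Dict Int String) (limit : Int) : List String → PySem.Set Int → List Int
  | [], _ => []
  | k :: ks, taken =>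
    let found := chooseAInner hm (pyNorm k) taken (PySem.List.pyRange 0 limit 1)
    found :: chooseALoop hm limit ks (if found ≥ 0 then PySem.Set.add taken found else taken)

def choose_indices_for_sheet_py (sheet_name : String) (header_map : List (Int × String)) : List Int :=
  match pySheetSpecs.get? sheet_name with
  | none => []  -- Python raises KeyError here; excluded by Pre_
  | some (keys, limit) => chooseALoop (PySem.Dict.mk header_map) limit keys PySem.Set.empty

-- ===== PORT B =====
-- B's first pass: index = {header value ↦ its column indices < limit, ascending}
def chooseBIndex (hm : PySem.Dict Int String) (limit : Int) : PySem.Dict String (List Int) :=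
  (PySem.List.pyRange 0 limit 1).foldl
    (fun d c =>
      match hm.get? c with
      | some v => d.modify v [] (· ++ [c])  -- index.setdefault(v, []).append(c)
      | none => d)
    PySem.Dict.empty

-- B's second pass: pop the front of the matching list, or -1
def chooseBLoop (index : PySem.Dict String (List Int)) : List String → List Int
  | [] => []
  | k :: ks =>
    match index.getD (pyNorm k) [] with
    | [] => -1 :: chooseBLoop index ks
    | c :: cs => c :: chooseBLoop (index.insert (pyNorm k) cs) ks  -- cols.pop(0) mutates the entry

def choose_indices_for_sheet_py_alt (sheet_name : String) (header_map : List (Int × String)) : List Int :=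
  match pySheetSpecs.get? sheet_name with
  | none => []  -- Python raises KeyError here; excluded by Pre_
  | some (keys, limit) => chooseBLoop (chooseBIndex (PySem.Dict.mk header_map) limit) keys

-- ===== PRECONDITION & SPEC =====
-- Pre_ excludes exactly the sheet names outside SHEET_SPECS, where Python's A raises KeyError.
def Pre_choose_indices_for_sheet_py (sheet_name : String) (header_map : List (Int × String)) : Prop :=
  sheet_name = "Company_Grouped" ∨ sheet_name = "Branches_Grouped"
instance (sheet_name : String) (header_map : List (Int × String)) : Decidable (Pre_choose_indices_for_sheet_py sheet_name header_map) := by unfold Pre_choose_indices_for_sheet_py; infer_instance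

def pvWitness_choose_indices_for_sheet_py : String × (List (Int × String)) :=
  ("Company_Grouped", [(0, "id"), (2, "printer ip"), (3, "id")])

def Spec_choose_indices_for_sheet_py (sheet_name : String) (header_map : List (Int × String)) (out : List Int) : Prop := out = choose_indices_for_sheet_py_alt sheet_name header_map
instance (sheet_name : String) (header_map : List (Int × String)) (out : List Int) : Decidable (Spec_choose_indices_for_sheet_py sheet_name header_map out) := by unfold Spec_choose_indices_for_sheet_py; infer_instance

-- ===== CLAIM (what is proved, stated in full; the proofs are below) =====
def Claim_equal_choose_indices_for_sheet_py : Prop := ∀ (sheet_name : String) (header_map : List (Int × String)), Dom_choose_indices_for_sheet_py sheet_name header_map → Pre_choose_indices_for_sheet_py sheet_name header_map → Spec_choose_indices_for_sheet_py sheet_name header_map (choose_indices_for_sheet_py sheet_name header_map)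

-- ===== LEMMAS AND PROOFS =====

-- the value both loops compute per key: first column < limit whose header equals the target, else -1
def pvFirstCol (hm : PySem.Dict Int String) (limit : Int) (t : String) : Int :=
  ((PySem.List.pyRange 0 limit 1).find? (fun c => hm.get? c == some t)).getD (-1)

theorem chooseAInner_eq (hm : PySem.Dict Int String) (t : String) (taken : PySem.Set Int)
    (cs : List Int) (h : ∀ c ∈ taken, hm.get? c ≠ some t) :
    chooseAInner hm t taken cs = ((cs.find? (fun c => hm.get? c == some t)).getD (-1)) := by
  induction cs with
  | nil => rfl
  | cons c cs ih =>
    by_cases hc : hm.get? c = some t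
    · have hcont : hm.contains c = true := by
        rw [PySem.Dict.contains_eq_isSome_get?, hc]; rfl
      have hmemf : c ∉ taken := fun hmem => h c hmem hc
      simp [chooseAInner, hcont, hc, hmemf, List.find?]
    · have : (hm.get? c == some t) = false := by simpa using hc
      simp [chooseAInner, this, List.find?, ih]

theorem chooseALoop_eq (hm : PySem.Dict Int String) (limit : Int) (ks : List String)
    (taken : PySem.Set Int) (hnd : (ks.map pyNorm).Nodup)
    (h : ∀ k ∈ ks, ∀ c ∈ taken, hm.get? c ≠ some (pyNorm k)) :
    chooseALoop hm limit ks taken = ks.map (fun k => pvFirstCol hm limit (pyNorm k)) := by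
  induction ks generalizing taken with
  | nil => rfl
  | cons k ks ih =>
    have hk := chooseAInner_eq hm (pyNorm k) taken (PySem.List.pyRange 0 limit 1)
      (h k (List.mem_cons_self ..))
    simp only [List.map_cons, List.nodup_cons] at hnd ⊢
    rw [chooseALoop, hk]
    refine congrArg₂ _ rfl ?_
    cases hfind : (PySem.List.pyRange 0 limit 1).find? (fun c => hm.get? c == some (pyNorm k)) with
    | none =>
      simp only [Option.getD_none]
      rw [if_neg (by norm_num)]
      exact ih taken hnd.2 (fun k' hk' c hc => h k' (List.mem_cons_of_mem _ hk') c hc)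
    | some c =>
      have hmem : c ∈ PySem.List.pyRange 0 limit 1 := List.mem_of_find?_eq_some hfind
      have hcv : hm.get? c = some (pyNorm k) := by
        have := List.find?_some hfind; simpa using this
      have hc0 : (0:Int) ≤ c := ((PySem.List.mem_pyRange_one).mp hmem).1
      simp only [Option.getD_some]
      rw [if_pos hc0]
      refine ih _ hnd.2 (fun k' hk' c' hc' hbad => ?_)
      rcases (PySem.Set.mem_add taken c c').mp hc' with hold | rfl
      · exact h k' (List.mem_cons_of_mem _ hk') c' hold hbad
      · rw [hcv] at hbad
        have heq : pyNorm k = pyNorm k' := Option.some.inj hbad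
        refine hnd.1 ?_
        rw [heq]
        exact List.mem_map_of_mem hk' 

theorem chooseBIndex_pairs (hm : PySem.Dict Int String) (cols : List Int)
    (d : PySem.Dict String (List Int)) :
    cols.foldl
      (fun d c => match hm.get? c with
        | some v => d.modify v [] (· ++ [c])
        | none => d) d
    = (cols.filterMap (fun c => (hm.get? c).map (fun v => (v, c)))).foldl
        (fun d p => d.modify p.1 [] (· ++ [p.2])) d := by
  induction cols generalizing d with
  | nil => rfl
  | cons c cs ih =>
    cases hc : hm.get? c with
    | none => simp [hc, ih]
    | some v => simp [hc, ih]

theorem chooseBIndex_getD (hm : PySem.Dict Int String) (limit : Int) (t : String) :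
    (chooseBIndex hm limit).getD t []
      = (PySem.List.pyRange 0 limit 1).filter (fun c => hm.get? c == some t) := by
  rw [chooseBIndex, chooseBIndex_pairs, PySem.Dict.getD_foldl_modify_append]
  have : ∀ cols : List Int,
      ((cols.filterMap (fun c => (hm.get? c).map (fun v => (v, c)))).filter
          (fun p => p.1 == t)).map (·.2)
        = cols.filter (fun c => hm.get? c == some t) := by
    intro cols
    induction cols with
    | nil => rfl
    | cons c cs ih =>
      cases hc : hm.get? c with
      | none =>
        simp [hc, ih]
      | some v =>
        by_cases hv : v = t
        · subst hv
          simp [hc, ih]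
        · have h1 : (v == t) = false := by simpa using hv
          have h2 : (hm.get? c == some t) = false := by simp [hc, hv]
          simp [hc, h1, ih]
  simp [this]

theorem chooseBLoop_eq (hm : PySem.Dict Int String) (limit : Int) (ks : List String)
    (index : PySem.Dict String (List Int)) (hnd : (ks.map pyNorm).Nodup)
    (h : ∀ k ∈ ks, index.getD (pyNorm k) []
          = (PySem.List.pyRange 0 limit 1).filter (fun c => hm.get? c == some (pyNorm k))) :
    chooseBLoop index ks = ks.map (fun k => pvFirstCol hm limit (pyNorm k)) := by
  induction ks generalizing index with
  | nil => rfl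
  | cons k ks ih =>
    simp only [List.map_cons, List.nodup_cons] at hnd ⊢
    have hk := h k (List.mem_cons_self ..)
    have hhead : pvFirstCol hm limit (pyNorm k)
        = (((PySem.List.pyRange 0 limit 1).filter (fun c => hm.get? c == some (pyNorm k))).head?).getD (-1) := by
      rw [pvFirstCol, ← List.head?_filter]
    cases hflt : (PySem.List.pyRange 0 limit 1).filter (fun c => hm.get? c == some (pyNorm k)) with
    | nil =>
      rw [chooseBLoop, hk, hflt]
      rw [hhead, hflt]
      simp only [List.head?_nil, Option.getD_none]
      refine congrArg₂ _ rfl (ih index hnd.2 (fun k' hk' => h k' (List.mem_cons_of_mem _ hk')))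
    | cons c cs =>
      rw [chooseBLoop, hk, hflt]
      rw [hhead, hflt]
      simp only [List.head?_cons, Option.getD_some]
      refine congrArg₂ _ rfl (ih _ hnd.2 (fun k' hk' => ?_))
      rw [PySem.Dict.getD_insert_of_ne]
      · exact h k' (List.mem_cons_of_mem _ hk')
      · intro heq
        refine hnd.1 ?_
        rw [← heq]
        exact List.mem_map_of_mem hk' 

theorem both_eq (hm : PySem.Dict Int String) (keys : List String) (limit : Int)
    (hnd : (keys.map pyNorm).Nodup) :
    chooseALoop hm limit keys PySem.Set.empty
      = chooseBLoop (chooseBIndex hm limit) keys := by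
  rw [chooseALoop_eq hm limit keys PySem.Set.empty hnd (by intro k _ c hc; cases hc),
      chooseBLoop_eq hm limit keys _ hnd (fun k _ => chooseBIndex_getD hm limit (pyNorm k))]

-- ===== VERDICT (by name: the statement is the Claim_ definition above) =====
theorem choose_indices_for_sheet_py_spec : Claim_equal_choose_indices_for_sheet_py := by
  intro sheet_name header_map _ hpre
  unfold Spec_choose_indices_for_sheet_py choose_indices_for_sheet_py choose_indices_for_sheet_py_alt
  rcases hpre with rfl | rfl
  · have hs : pySheetSpecs.get? "Company_Grouped"
        = some (["ID", "Floor", "Printer IP", "Type", "Serial", "Comment"], 6) := by decide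
    rw [hs]
    exact both_eq _ _ _ (by decide)
  · have hs : pySheetSpecs.get? "Branches_Grouped"
        = some (["ID", "Name", "Printer IP", "BO IP", "Type", "Serial", "Comment"], 7) := by decide
    rw [hs]
    exact both_eq _ _ _ (by decide)
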